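-- pv_equiv track=rewrite | github.com/MurylloEx/PyPacman | pacman.py | VgQueueNextObjectToDraw
-- ===== SOURCE A (Python) =====
-- def VgQueueNextObjectToDraw(pVgBuffer: list):
--     if (len(pVgBuffer) > 0):
--         bStart = True
--         lowerZ = int(0)
--         lastIndex = 0
--         nextVgObject = []
--         for VgIndex in range(len(pVgBuffer)):
--             if (bStart == True):
--                 bStart = False
--                 lowerZ = pVgBuffer[VgIndex][1]
--                 nextVgObject = pVgBuffer[VgIndex]
--                 lastIndex = VgIndex
--             else:
--                 if (lowerZ > pVgBuffer[VgIndex][1]):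
--                     lowerZ = pVgBuffer[VgIndex][1]
--                     nextVgObject = pVgBuffer[VgIndex]
--                     lastIndex = VgIndex
--         pVgBuffer.pop(lastIndex)
--         return nextVgObject
--     else:
--         return None
-- ===== SOURCE B (Python) =====
-- def VgQueueNextObjectToDraw(pVgBuffer: list):
--     # Sort-based: a stable sort by z puts the first lowest-z object at the front
--     # (stability reproduces A's strict-> tie-keeping); remove deletes that same
--     # first occurrence, so the buffer mutation matches A's pop as well.
--     if not pVgBuffer:
--         return None
--     obj = sorted(pVgBuffer, key=lambda o: o[1])[0]
--     pVgBuffer.remove(obj)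
--     return obj
-- ===== Notes on version B (the rewrite author's own statement) =====
-- stated objective: alternative
-- what changed: Replaces A's single-pass hand-tracked bStart/lowerZ/lastIndex scan with a sort-based strategy: stably sort a copy by z and take the head (stability gives the first lowest-z object, matching A's strict > tie-keeping), then remove it.
-- outside the precondition, e.g. on VgQueueNextObjectToDraw([[1], [2]]): A raises IndexError, B raises IndexError
import Mathlib
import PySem

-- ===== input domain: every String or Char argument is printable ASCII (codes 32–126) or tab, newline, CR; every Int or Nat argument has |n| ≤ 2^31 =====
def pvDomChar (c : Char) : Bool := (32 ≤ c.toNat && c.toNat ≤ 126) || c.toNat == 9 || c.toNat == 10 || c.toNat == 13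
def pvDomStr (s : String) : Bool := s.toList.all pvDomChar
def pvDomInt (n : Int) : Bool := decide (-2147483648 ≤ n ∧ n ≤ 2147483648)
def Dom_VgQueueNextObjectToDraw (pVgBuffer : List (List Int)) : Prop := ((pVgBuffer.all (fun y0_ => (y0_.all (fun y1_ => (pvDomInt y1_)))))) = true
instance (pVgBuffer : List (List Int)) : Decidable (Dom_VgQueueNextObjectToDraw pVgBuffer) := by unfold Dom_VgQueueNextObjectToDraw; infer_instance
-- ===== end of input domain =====

-- B replaces A's hand-tracked bStart/lowerZ/lastIndex scan with a sort-based strategy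
-- (stable sort by z, take the head, remove it); both mutate pVgBuffer identically
-- (they delete the returned first lowest-z element); equivalence proved on the return value.


-- ===== PORT A =====
-- loop body of A; state = (bStart, lowerZ, nextVgObject); lastIndex feeds only the pop
-- (the in-place mutation, not the return value) and is not modelled.
-- pVgBuffer[VgIndex][1] is exact under Pre_ (every element has length ≥ 2; elsewhere Python raises IndexError).
def pvAStep (st : Bool × Int × List Int) (cur : List Int) : Bool × Int × List Int :=
  if st.1 = true then (false, PySem.List.pyGetD cur 1 0, cur)
  else if st.2.1 > PySem.List.pyGetD cur 1 0 then (false, PySem.List.pyGetD cur 1 0, cur)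
  else st

def VgQueueNextObjectToDraw (pVgBuffer : List (List Int)) : Option (List Int) :=
  if PySem.List.len pVgBuffer > 0 then
    some (((PySem.List.pyRange 0 (PySem.List.len pVgBuffer)).foldl
      (fun acc j => pvAStep acc (PySem.List.pyGetD pVgBuffer j [])) (true, 0, [])).2.2)
  else none

-- ===== PORT B =====
-- Source B: sorted(pVgBuffer, key=lambda o: o[1])[0]; o[1] is exact under Pre_.
def VgQueueNextObjectToDraw_alt (pVgBuffer : List (List Int)) : Option (List Int) :=
  if pVgBuffer = [] then none
  else PySem.List.pyGet?
    (PySem.List.sorted pVgBuffer (fun o => PySem.List.pyGetD o 1 0) false) 0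

-- ===== PRECONDITION & SPEC =====
-- Pre_ excludes buffers containing an object with fewer than 2 fields: there both A and B raise IndexError (o[1]).
def Pre_VgQueueNextObjectToDraw (pVgBuffer : List (List Int)) : Prop :=
  ∀ l ∈ pVgBuffer, 2 ≤ l.length
instance (pVgBuffer : List (List Int)) : Decidable (Pre_VgQueueNextObjectToDraw pVgBuffer) := by unfold Pre_VgQueueNextObjectToDraw; infer_instance
def pvWitness_VgQueueNextObjectToDraw : List (List Int) := [[0, 3], [1, 1], [2, 1]]
def Spec_VgQueueNextObjectToDraw (pVgBuffer : List (List Int)) (out : Option (List Int)) : Prop := out = VgQueueNextObjectToDraw_alt pVgBuffer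
instance (pVgBuffer : List (List Int)) (out : Option (List Int)) : Decidable (Spec_VgQueueNextObjectToDraw pVgBuffer out) := by unfold Spec_VgQueueNextObjectToDraw; infer_instance

-- ===== CLAIM (what is proved, stated in full; the proofs are below) =====
def Claim_equal_VgQueueNextObjectToDraw : Prop := ∀ (pVgBuffer : List (List Int)), Dom_VgQueueNextObjectToDraw pVgBuffer → Pre_VgQueueNextObjectToDraw pVgBuffer → Spec_VgQueueNextObjectToDraw pVgBuffer (VgQueueNextObjectToDraw pVgBuffer)

-- ===== LEMMAS AND PROOFS =====

-- "first minimum" as a left fold; the common characterisation of both programs' results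
def pvBStep (acc : Option (List Int)) (x : List Int) : Option (List Int) :=
  match acc with
  | none => some x
  | some m => if PySem.List.pyGetD x 1 0 < PySem.List.pyGetD m 1 0 then some x else some m

-- key used throughout
def pvKey (o : List Int) : Int := PySem.List.pyGetD o 1 0

lemma head_insertBy (x : List Int) (acc : List (List Int)) :
    (PySem.List.insertBy (fun a b => decide (pvKey a < pvKey b)) x acc).head?
      = pvBStep acc.head? x := by
  cases acc with
  | nil => rfl
  | cons y ys =>
      simp only [PySem.List.insertBy, pvBStep, pvKey]
      split <;> simp_all

lemma head_foldl_insertBy (t : List (List Int)) : ∀ (acc : List (List Int)),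
    (t.foldl (fun a x => PySem.List.insertBy (fun a b => decide (pvKey a < pvKey b)) x a) acc).head?
      = t.foldl pvBStep acc.head? := by
  induction t with
  | nil => intro acc; rfl
  | cons u t ih =>
      intro acc
      simp only [List.foldl_cons]
      rw [ih, head_insertBy]

lemma head_sorted (xs : List (List Int)) :
    (PySem.List.sorted xs pvKey false).head? = xs.foldl pvBStep none := by
  rw [PySem.List.sorted_eq_foldl_insertBy]
  exact head_foldl_insertBy xs []

lemma foldl_some (t : List (List Int)) : ∀ m, ∃ r, t.foldl pvBStep (some m) = some r := by
  induction t with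
  | nil => intro m; exact ⟨m, rfl⟩
  | cons x t ih =>
      intro m
      simp only [List.foldl_cons, pvBStep]
      split <;> apply ih

lemma loop_eq (t : List (List Int)) : ∀ (m : List Int),
    t.foldl pvAStep (false, PySem.List.pyGetD m 1 0, m)
      = (false, PySem.List.pyGetD ((t.foldl pvBStep (some m)).getD []) 1 0,
          (t.foldl pvBStep (some m)).getD []) := by
  induction t with
  | nil => intro m; simp
  | cons x t ih =>
      intro m
      simp only [List.foldl_cons, pvAStep, pvBStep]
      by_cases h : PySem.List.pyGetD x 1 0 < PySem.List.pyGetD m 1 0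
      · simp [h, gt_iff_lt, ih]
      · simp [h, gt_iff_lt, ih]

lemma pyGet?_zero_head? (l : List (List Int)) : PySem.List.pyGet? l 0 = l.head? := by
  cases l <;> simp [PySem.List.pyGet?, PySem.List.pyIdx?]

-- ===== VERDICT (by name: the statement is the Claim_ definition above) =====
theorem VgQueueNextObjectToDraw_spec : Claim_equal_VgQueueNextObjectToDraw := by
  intro b _ _
  unfold Spec_VgQueueNextObjectToDraw VgQueueNextObjectToDraw VgQueueNextObjectToDraw_alt
  cases b with
  | nil => simp [PySem.List.len]
  | cons x t =>
      have hlt : (0:Int) < PySem.List.len (x :: t) := by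
        simp [PySem.List.len]
      rw [if_pos hlt, if_neg (by simp : ¬(x :: t) = [])]
      rw [PySem.List.pyRange_one_cons hlt, List.foldl_cons]
      simp only [zero_add]
      rw [PySem.List.foldl_pyRange_pyGetD (x :: t) [] pvAStep _ (by norm_num : (0:Int) ≤ 1)]
      have hg0 : PySem.List.pyGetD (x :: t) 0 [] = x := by
        simp [PySem.List.pyGetD, PySem.List.pyGet?, PySem.List.pyIdx?]
      have hstep : pvAStep (true, 0, []) x = (false, PySem.List.pyGetD x 1 0, x) := by
        simp [pvAStep]
      simp only [hg0, hstep, Int.toNat_one, List.drop_one, List.tail_cons]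
      rw [loop_eq]
      obtain ⟨r, hr⟩ := foldl_some t x
      rw [pyGet?_zero_head?, show (fun o => PySem.List.pyGetD o 1 0) = pvKey from rfl, head_sorted, List.foldl_cons,
        show pvBStep none x = some x from rfl, hr]
      simp
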